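-- pv_equiv track=rewrite | github.com/eliottcassidy2000/math | 04-computation/path_homology_core.py | enumerate_allowed_paths
-- ===== SOURCE A (Python) =====
-- from itertools import permutations, combinations
--
-- def is_allowed_path(A, path):
--     """Check if path is allowed (all consecutive pairs are directed edges)."""
--     for i in range(len(path) - 1):
--         if A[path[i]][path[i+1]] != 1:
--             return False
--     return True
--
-- def enumerate_allowed_paths(A, n, p):
--     """Enumerate all allowed p-paths (sequences of p+1 distinct vertices following edges)."""
--     if p == 0:
--         return [(v,) for v in range(n)]
--
--     paths = []
--     # Generate all sequences of p+1 distinct vertices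
--     for perm in permutations(range(n), p + 1):
--         if is_allowed_path(A, perm):
--             paths.append(perm)
--     return paths
-- ===== SOURCE B (Python) =====
-- def enumerate_allowed_paths(A, n, p):
--     """Enumerate all allowed p-paths by DFS/backtracking, extending valid
--     prefixes in increasing vertex order."""
--     paths = []
--     path = []
--
--     def dfs():
--         if len(path) == p + 1:
--             paths.append(tuple(path))
--             return
--         last = path[-1]
--         for w in range(n):
--             if A[last][w] == 1 and w not in path:
--                 path.append(w)
--                 dfs()
--                 path.pop()
--
--     for v in range(n):
--         path.append(v)
--         dfs()
--         path.pop()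
--     return paths
-- ===== Notes on version B (the rewrite author's own statement) =====
-- stated objective: alternative
-- what changed: A materialises every (p+1)-permutation of range(n) and filters each with a full edge check; B enumerates paths by DFS backtracking, extending only prefixes whose every edge is already valid, so invalid branches are pruned at the first bad edge.
-- outside the precondition, e.g. on enumerate_allowed_paths([[0, 1], [1, 0]], 2, -1): A returns [()], B returns []; on enumerate_allowed_paths([[0, 1], [1]], 2, 1): A returns [(0, 1), (1, 0)], B raises IndexError; on enumerate_allowed_paths([], 1, 1): A returns [], B raises IndexError
import Mathlib
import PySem

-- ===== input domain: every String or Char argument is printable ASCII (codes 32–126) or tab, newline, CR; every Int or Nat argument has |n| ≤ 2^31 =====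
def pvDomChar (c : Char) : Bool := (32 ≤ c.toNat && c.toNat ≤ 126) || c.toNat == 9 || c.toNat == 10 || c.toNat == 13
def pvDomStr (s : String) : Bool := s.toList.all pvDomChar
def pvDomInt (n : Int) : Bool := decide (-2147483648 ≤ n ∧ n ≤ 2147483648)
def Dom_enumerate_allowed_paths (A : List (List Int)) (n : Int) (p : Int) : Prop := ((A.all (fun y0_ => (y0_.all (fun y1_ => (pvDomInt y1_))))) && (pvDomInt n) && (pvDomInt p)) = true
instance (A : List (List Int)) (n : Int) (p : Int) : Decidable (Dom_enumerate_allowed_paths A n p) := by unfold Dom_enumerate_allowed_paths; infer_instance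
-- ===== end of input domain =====

-- B replaces A's generate-every-permutation-then-filter loop by DFS backtracking that only
-- extends already-valid path prefixes, abandoning a branch at its first bad edge
-- (objective: alternative algorithm; speed not claimed).
-- ===== PORT A =====
-- itertools.permutations(pool, r): for each position pick an element and recurse on the
-- pool with that element removed (order preserved); this yields exactly itertools' order.
def pvSelections : List Int → List (Int × List Int)
  | [] => []
  | x :: xs => (x, xs) :: (pvSelections xs).map (fun q => (q.1, x :: q.2))

-- itertools documents: if r > len(pool) the iterator is empty at once (no search happens)
def pvPerms : Nat → List Int → List (List Int)
  | 0, _ => [[]]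
  | r + 1, xs =>
    if xs.length < r + 1 then []
    else (pvSelections xs).flatMap (fun q => (pvPerms r q.2).map (fun t => q.1 :: t))

-- is_allowed_path: loop over i in range(len(path)-1); early 'return False' = Bool 'all'
def pvIsAllowedPath (A : List (List Int)) (path : List Int) : Bool :=
  (List.range (path.length - 1)).all (fun i =>
    PySem.List.pyGetD
      (PySem.List.pyGetD A (PySem.List.pyGetD path (i : Int) 0) [])
      (PySem.List.pyGetD path ((i : Int) + 1) 0) 0 == 1)

def enumerate_allowed_paths (A : List (List Int)) (n : Int) (p : Int) : List (List Int) :=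
  if p == 0 then (PySem.List.pyRange 0 n 1).map (fun v => [v])
  else (pvPerms (p + 1).toNat (PySem.List.pyRange 0 n 1)).filter (pvIsAllowedPath A)

-- ===== PORT B =====
-- dfs(): Python's recursion ported with a fuel counter ((p+1).toNat steps bound the
-- recursion depth; the fuel-0 branch is a totality guard, unreachable on admitted inputs)
def pvDfs (A : List (List Int)) (n p : Int) : Nat → List Int → List (List Int)
  | fuel, path =>
    if (path.length : Int) == p + 1 then [path]
    else
      match fuel with
      | 0 => []
      | fuel + 1 =>
        (PySem.List.pyRange 0 n 1).flatMap (fun w =>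
          if PySem.List.pyGetD (PySem.List.pyGetD A (PySem.List.pyGetD path (-1) 0) []) w 0 == 1
              && !path.contains w
          then pvDfs A n p fuel (path ++ [w]) else [])

def enumerate_allowed_paths_alt (A : List (List Int)) (n : Int) (p : Int) : List (List Int) :=
  (PySem.List.pyRange 0 n 1).flatMap (fun v => pvDfs A n p (p + 1).toNat [v])

-- ===== PRECONDITION & SPEC =====
-- Pre_ excludes (a) p < 0: for p = -1 Python A returns the degenerate [()] (an empty tuple;
-- B's DFS naturally yields no length-0 path) and for p ≤ -2 A raises ValueError; and
-- (b) matrices lacking entries A[u][w] for u,w < n when n ≥ 1 and p ≥ 1: there A raises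
-- IndexError or (when p ≥ n, so A never reads the matrix) B's DFS raises where A returns [].
def Pre_enumerate_allowed_paths (A : List (List Int)) (n : Int) (p : Int) : Prop :=
  0 ≤ p ∧ (p = 0 ∨ n ≤ 0 ∨
    (n.toNat ≤ A.length ∧ ∀ row ∈ A.take n.toNat, n.toNat ≤ row.length))
instance (A : List (List Int)) (n : Int) (p : Int) : Decidable (Pre_enumerate_allowed_paths A n p) := by unfold Pre_enumerate_allowed_paths; infer_instance

def pvWitness_enumerate_allowed_paths : List (List Int) × Int × Int := ([[0, 1], [1, 0]], 2, 1)

def Spec_enumerate_allowed_paths (A : List (List Int)) (n : Int) (p : Int) (out : List (List Int)) : Prop := out = enumerate_allowed_paths_alt A n p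
instance (A : List (List Int)) (n : Int) (p : Int) (out : List (List Int)) : Decidable (Spec_enumerate_allowed_paths A n p out) := by unfold Spec_enumerate_allowed_paths; infer_instance

-- ===== CLAIM (what is proved, stated in full; the proofs are below) =====
def Claim_equal_enumerate_allowed_paths : Prop := ∀ (A : List (List Int)) (n : Int) (p : Int), Dom_enumerate_allowed_paths A n p → Pre_enumerate_allowed_paths A n p → Spec_enumerate_allowed_paths A n p (enumerate_allowed_paths A n p)

-- ===== LEMMAS AND PROOFS =====

-- the edge test both programs perform, and the incremental ("chain") reading of A's check
def pvEdge (A : List (List Int)) (u w : Int) : Bool :=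
  PySem.List.pyGetD (PySem.List.pyGetD A u []) w 0 == 1

def pvChainFrom (A : List (List Int)) : Int → List Int → Bool
  | _, [] => true
  | u, w :: t => pvEdge A u w && pvChainFrom A w t

def pvChain (A : List (List Int)) : List Int → Bool
  | [] => true
  | v :: t => pvChainFrom A v t

theorem pvAllCongr {α : Type} (l : List α) (p q : α → Bool) (h : ∀ x ∈ l, p x = q x) :
    l.all p = l.all q := by
  induction l with
  | nil => rfl
  | cons x xs ih =>
    simp only [List.all_cons, h x (by simp), ih (fun y hy => h y (by simp [hy]))]

theorem pvFlatMapCongr {α β : Type} (l : List α) (f g : α → List β)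
    (h : ∀ x ∈ l, f x = g x) : l.flatMap f = l.flatMap g := by
  induction l with
  | nil => rfl
  | cons x xs ih =>
    simp only [List.flatMap_cons, h x (by simp), ih (fun y hy => h y (by simp [hy]))]

theorem pvFlatMap_if {α β : Type} (l : List α) (q : α → Bool) (f : α → List β) :
    (l.flatMap (fun x => if q x then f x else [])) = (l.filter q).flatMap f := by
  induction l with
  | nil => rfl
  | cons x xs ih => by_cases h : q x <;> simp [h, ih]

theorem pvFilterFlatMap {α β : Type} (l : List α) (f : α → List β) (p : β → Bool) :
    (l.flatMap f).filter p = l.flatMap (fun a => (f a).filter p) := by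
  induction l with
  | nil => rfl
  | cons x xs ih => simp [List.filter_append, ih]

theorem pvMapFlatMap {α β γ : Type} (l : List α) (f : α → List β) (g : β → γ) :
    (l.flatMap f).map g = l.flatMap (fun a => (f a).map g) := by
  induction l with
  | nil => rfl
  | cons x xs ih => simp [ih]

theorem pvIsAllowedPath_cons2 (A : List (List Int)) (x y : Int) (t : List Int) :
    pvIsAllowedPath A (x :: y :: t) = (pvEdge A x y && pvIsAllowedPath A (y :: t)) := by
  unfold pvIsAllowedPath pvEdge
  simp only [List.length_cons, Nat.add_sub_cancel, List.range_succ_eq_map, List.all_cons,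
    List.all_map]
  refine congrArg₂ (· && ·) ?_ (pvAllCongr _ _ _ ?_)
  · simp [PySem.List.pyGetD_ofNat']
  · intro i _
    simp only [Function.comp_apply, Nat.succ_eq_add_one]
    rw [show (((i + 1 : Nat)) : Int) + 1 = (((i + 2 : Nat)) : Int) by push_cast; ring]
    rw [show ((i : Int) + 1) = (((i + 1 : Nat)) : Int) by push_cast; ring]
    simp only [PySem.List.pyGetD_natCast]
    simp

theorem pvIsAllowedPath_eq_chain (A : List (List Int)) (path : List Int) :
    pvIsAllowedPath A path = pvChain A path := by
  induction path with
  | nil => rfl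
  | cons x t ih =>
    cases t with
    | nil => rfl
    | cons y t' =>
      rw [pvIsAllowedPath_cons2, ih]
      rfl

theorem pvSelections_eq_map_erase (xs : List Int) (h : xs.Nodup) :
    pvSelections xs = xs.map (fun x => (x, xs.erase x)) := by
  induction xs with
  | nil => rfl
  | cons x xs ih =>
    rcases List.nodup_cons.mp h with ⟨hx, hnd⟩
    simp only [pvSelections, ih hnd, List.map_map, List.map_cons, List.erase_cons_head]
    congr 1
    apply List.map_congr_left
    intro y hy
    have hne : x ≠ y := fun e => hx (e ▸ hy)
    simp [Function.comp, List.erase_cons_tail, hne]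

theorem pvFilterChain_map_cons (A : List (List Int)) (u x : Int) (L : List (List Int)) :
    (L.map (fun t => x :: t)).filter (pvChainFrom A u)
      = if pvEdge A u x then (L.filter (pvChainFrom A x)).map (fun t => x :: t) else [] := by
  rw [List.filter_map]
  rw [List.filter_congr (fun t (_ : t ∈ L) =>
    show (pvChainFrom A u ∘ fun t => x :: t) t = (pvEdge A u x && pvChainFrom A x t) from rfl)]
  by_cases h : pvEdge A u x <;> simp [h]

-- the DFS with the last vertex of the prefix carried explicitly
def pvG (A : List (List Int)) (pool : List Int) : Nat → List Int → Int → List (List Int)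
  | 0, path, _ => [path]
  | r + 1, path, u =>
    (pool.filter (fun w => pvEdge A u w && !path.contains w)).flatMap
      (fun w => pvG A pool r (path ++ [w]) w)

theorem pvDfs_eq_pvG (A : List (List Int)) (n p : Int) :
    ∀ (r fuel : Nat) (path : List Int) (u : Int), r ≤ fuel → path ≠ [] →
      path.getLast? = some u → (path.length : Int) + r = p + 1 →
      pvDfs A n p fuel path = pvG A (PySem.List.pyRange 0 n 1) r path u := by
  intro r
  induction r with
  | zero =>
    intro fuel path u _ _ _ hlen
    have hpe : ((path.length : Int) == p + 1) = true := by
      simp only [beq_iff_eq]; omega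
    cases fuel <;> · rw [pvDfs]; simp [hpe, pvG]
  | succ r ih =>
    intro fuel path u hle hne hlast hlen
    cases fuel with
    | zero => omega
    | succ f =>
      have hpe : ((path.length : Int) == p + 1) = false := by
        simp only [beq_eq_false_iff_ne, ne_eq]
        omega
      rw [pvDfs]
      simp only [hpe, Bool.false_eq_true, if_false]
      have hu : PySem.List.pyGetD path (-1) 0 = u := by
        rw [PySem.List.pyGetD_neg_one path 0 hne]
        have := List.getLast?_eq_some_getLast hne
        rw [hlast] at this
        exact (Option.some_inj.mp this).symm
      rw [hu]
      rw [pvFlatMap_if, pvG]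
      unfold pvEdge
      apply pvFlatMapCongr
      intro w _
      apply ih
      · omega
      · simp
      · exact List.getLast?_concat
      · simp only [List.length_append, List.length_cons, List.length_nil]
        push_cast
        push_cast at hlen
        omega

theorem pvAvailErase (pool : List Int) (hnd : pool.Nodup) (path : List Int) (x : Int) :
    pool.filter (fun w => !(path ++ [x]).contains w)
      = (pool.filter (fun w => !path.contains w)).erase x := by
  rw [List.Nodup.erase_eq_filter (hnd.filter _), List.filter_filter]
  apply List.filter_congr
  intro w _
  by_cases h : w = x <;> simp [h]

theorem pvG_eq_nil (A : List (List Int)) (pool : List Int) (hnd : pool.Nodup) :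
    ∀ (r : Nat) (path : List Int) (u : Int),
      (pool.filter (fun w => !path.contains w)).length < r → pvG A pool r path u = [] := by
  intro r
  induction r with
  | zero => intro path u h; exact absurd h (Nat.not_lt_zero _)
  | succ r ih =>
    intro path u h
    rw [pvG]
    refine (pvFlatMapCongr _ _ (fun _ => ([] : List (List Int))) (fun w hw => ?_)).trans (by simp)
    obtain ⟨hwp, hpred⟩ := List.mem_filter.mp hw
    have hwa : w ∈ pool.filter (fun z => !path.contains z) :=
      List.mem_filter.mpr ⟨hwp, by revert hpred; cases pvEdge A u w <;> cases path.contains w <;> simp⟩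
    have hpos : 0 < (pool.filter (fun z => !path.contains z)).length :=
      List.length_pos_of_mem hwa
    apply ih
    rw [pvAvailErase pool hnd path w, List.length_erase_of_mem hwa]
    omega

theorem pvG_eq_perms (A : List (List Int)) (pool : List Int) (hnd : pool.Nodup) :
    ∀ (r : Nat) (path : List Int) (u : Int),
      pvG A pool r path u =
        ((pvPerms r (pool.filter (fun w => !path.contains w))).filter
          (pvChainFrom A u)).map (fun t => path ++ t) := by
  intro r
  induction r with
  | zero => intro path u; simp [pvG, pvPerms, pvChainFrom]
  | succ r ih =>
    intro path u
    have hnda : (pool.filter (fun w => !path.contains w)).Nodup := hnd.filter _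
    by_cases hsz : (pool.filter (fun w => !path.contains w)).length < r + 1
    · rw [pvPerms, if_pos hsz, List.filter_nil, List.map_nil]
      exact pvG_eq_nil A pool hnd (r + 1) path u hsz
    rw [pvG, pvPerms, if_neg hsz, pvSelections_eq_map_erase _ hnda, List.flatMap_map,
        pvFilterFlatMap, pvMapFlatMap]
    rw [pvFlatMapCongr (pool.filter (fun w => !path.contains w)) _
      (fun x => if pvEdge A u x
        then ((pvPerms r ((pool.filter (fun w => !path.contains w)).erase x)).filter
            (pvChainFrom A x)).map (fun t => path ++ x :: t)
        else [])
      (fun x _ => by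
        simp only []
        rw [pvFilterChain_map_cons, apply_ite (List.map (fun t => path ++ t)), List.map_map]
        rfl)]
    rw [pvFlatMap_if, ← List.filter_filter]
    apply pvFlatMapCongr
    intro x hx
    rw [ih]
    rw [pvAvailErase pool hnd path x]
    rw [List.map_congr_left (fun t (_ : t ∈ _) => by
      show (path ++ [x]) ++ t = path ++ x :: t
      simp)]

-- ===== VERDICT (by name: the statement is the Claim_ definition above) =====
theorem enumerate_allowed_paths_spec : Claim_equal_enumerate_allowed_paths := by
  intro A n p _ hpre
  obtain ⟨hp, -⟩ := hpre
  unfold Spec_enumerate_allowed_paths enumerate_allowed_paths enumerate_allowed_paths_alt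
  have hnd : (PySem.List.pyRange 0 n 1).Nodup := PySem.List.nodup_pyRange_one 0 n
  by_cases hp0 : p = 0
  · subst hp0
    simp only [beq_self_eq_true, if_true]
    apply Eq.symm
    apply (pvFlatMapCongr _ _ (fun v => [[v]]) (fun v _ => by
      show pvDfs A n 0 ((0 : Int) + 1).toNat [v] = [[v]]
      rw [pvDfs_eq_pvG A n 0 0 (((0 : Int) + 1).toNat) [v] v (by omega) (by simp) rfl (by norm_num)]
      rfl)).trans
    induction PySem.List.pyRange 0 n 1 with
    | nil => rfl
    | cons x xs ih => simp [ih]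
  · have hpe : (p == 0) = false := by simp [hp0]
    obtain ⟨r, hr⟩ : ∃ r : Nat, p = (r : Int) + 1 := ⟨(p - 1).toNat, by omega⟩
    have h1 : (p + 1).toNat = r + 2 := by omega
    rw [hpe]
    simp only [Bool.false_eq_true, if_false, h1]
    -- B side: DFS = filtered permutations with first vertex split off
    rw [pvFlatMapCongr _ _
      (fun v => ((pvPerms (r + 1) ((PySem.List.pyRange 0 n 1).erase v)).filter
        (pvChainFrom A v)).map (fun t => v :: t))
      (fun v _ => by
        show pvDfs A n p (r + 2) [v] = _
        rw [pvDfs_eq_pvG A n p (r + 1) (r + 2) [v] v (by omega) (by simp) rfl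
          (by simp only [List.length_cons, List.length_nil]; rw [hr]; push_cast; ring)]
        rw [pvG_eq_perms A _ hnd]
        have hkey : (PySem.List.pyRange 0 n 1).filter (fun w => !(([v] : List Int).contains w))
            = (PySem.List.pyRange 0 n 1).erase v := by
          rw [List.Nodup.erase_eq_filter hnd]
          apply List.filter_congr
          intro w _
          by_cases h : w = v <;> simp [h]
        rw [hkey]
        apply List.map_congr_left
        intro t _
        simp)]
    -- A side: unfold one level of pvPerms and push the filter through
    by_cases hbig : (PySem.List.pyRange 0 n 1).length < r + 2
    · rw [pvPerms, if_pos hbig, List.filter_nil]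
      refine Eq.symm ((pvFlatMapCongr _ _ (fun _ => ([] : List (List Int)))
        (fun v hv => ?_)).trans (by simp))
      have hle : (( (PySem.List.pyRange 0 n 1).erase v).length) < r + 1 := by
        rw [List.length_erase_of_mem hv]; omega
      rw [pvPerms, if_pos hle]
      simp
    rw [List.filter_congr (fun t (_ : t ∈ pvPerms (r + 2) (PySem.List.pyRange 0 n 1)) =>
      pvIsAllowedPath_eq_chain A t)]
    rw [pvPerms, if_neg hbig, pvSelections_eq_map_erase _ hnd, List.flatMap_map, pvFilterFlatMap]
    apply pvFlatMapCongr
    intro v _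
    simp only []
    rw [List.filter_map]
    rw [List.filter_congr (fun t (_ : t ∈ pvPerms (r + 1) ((PySem.List.pyRange 0 n 1).erase v)) =>
      show (pvChain A ∘ fun t => v :: t) t = pvChainFrom A v t from rfl)]
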